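-- pv_equiv track=rewrite | github.com/ianderrington/genai | genai/text_processes/pagination.py | quality_gutenberg_parser
-- ===== SOURCE A (Python) =====
-- def quality_gutenberg_parser(raw_article):
--   """Parse Gutenberg articles in the QuALITY dataset.
--   """
--   lines = []
--   previous_line = None
--   for i, line in enumerate(raw_article.split('\n')):
--     line = line.strip()
--     original_line = line
--     if line == '':
--       if previous_line == '':
--         line = '\n'
--       else:
--         previous_line = original_line
--         continue
--     previous_line = original_line
--     lines.append(line)
--   return ' '.join(lines)
-- ===== SOURCE B (Python) =====
-- def quality_gutenberg_parser(raw_article):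
--     """Parse Gutenberg articles in the QuALITY dataset (run-length grouping version)."""
--     stripped = [l.strip() for l in raw_article.split('\n')]
--     out = []
--     i, n = 0, len(stripped)
--     while i < n:
--         if stripped[i] == '':
--             j = i + 1
--             while j < n and stripped[j] == '':
--                 j += 1
--             out.extend(['\n'] * (j - i - 1))
--             i = j
--         else:
--             out.append(stripped[i])
--             i += 1
--     return ' '.join(out)
-- ===== Notes on version B (the rewrite author's own statement) =====
-- stated objective: alternative
-- what changed: Replaces A's previous_line state machine with a two-level scan over the pre-stripped lines that groups each maximal run of blank lines and emits k-1 newline tokens per run of length k, appending non-blank lines directly.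
import Mathlib
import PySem

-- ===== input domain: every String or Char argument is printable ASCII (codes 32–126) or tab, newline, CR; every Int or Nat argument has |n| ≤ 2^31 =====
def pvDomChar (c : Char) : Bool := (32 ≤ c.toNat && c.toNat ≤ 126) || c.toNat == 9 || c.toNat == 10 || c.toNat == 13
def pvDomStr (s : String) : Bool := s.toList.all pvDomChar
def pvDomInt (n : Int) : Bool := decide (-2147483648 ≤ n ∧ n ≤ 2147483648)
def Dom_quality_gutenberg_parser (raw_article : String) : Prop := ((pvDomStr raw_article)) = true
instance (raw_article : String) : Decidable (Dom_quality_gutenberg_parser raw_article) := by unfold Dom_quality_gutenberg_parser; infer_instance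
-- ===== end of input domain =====

-- B replaces A's previous_line state machine by a run-length grouping pass over the
-- pre-stripped lines (each maximal blank run of length k contributes k-1 newline tokens);
-- objective: alternative decomposition, same cost.


-- ===== PORT A =====
-- A's for-loop with state (lines, previous_line); 'continue' = recurse without appending.
def gutLoopA (acc : List String) (prev : Option String) : List String → List String
  | [] => acc
  | l :: ls =>
    let line := PySem.Str.strip l
    if line = "" then
      if prev = some "" then gutLoopA (acc ++ ["\n"]) (some line) ls
      else gutLoopA acc (some line) ls
    else gutLoopA (acc ++ [line]) (some line) ls

-- raw_article.split('\n'): the separator is the non-empty literal "\n", so split? is always some.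
def quality_gutenberg_parser (raw_article : String) : String :=
  PySem.Str.join " " (gutLoopA [] none ((PySem.Str.split? raw_article "\n").getD []))

-- ===== PORT B =====
-- B's outer while-loop; the inner 'j' scan over blank lines is the takeWhile/dropWhile pair.
def gutLoopB : List String → List String
  | [] => []
  | l :: ls =>
    if l = "" then
      List.replicate (ls.takeWhile (· == "")).length "\n" ++ gutLoopB (ls.dropWhile (· == ""))
    else l :: gutLoopB ls
termination_by ls => ls.length
decreasing_by
  · exact Nat.lt_succ_of_le (List.length_dropWhile_le _ _)
  · simp

def quality_gutenberg_parser_alt (raw_article : String) : String :=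
  PySem.Str.join " " (gutLoopB (((PySem.Str.split? raw_article "\n").getD []).map PySem.Str.strip))

-- ===== PRECONDITION & SPEC =====
def Spec_quality_gutenberg_parser (raw_article : String) (out : String) : Prop := out = quality_gutenberg_parser_alt raw_article
instance (raw_article : String) (out : String) : Decidable (Spec_quality_gutenberg_parser raw_article out) := by unfold Spec_quality_gutenberg_parser; infer_instance

-- ===== CLAIM (what is proved, stated in full; the proofs are below) =====
def Claim_equal_quality_gutenberg_parser : Prop := ∀ (raw_article : String), Dom_quality_gutenberg_parser raw_article → Spec_quality_gutenberg_parser raw_article (quality_gutenberg_parser raw_article)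

-- ===== LEMMAS AND PROOFS =====

-- Continuation of B inside a blank run: one '\n' token per further blank line.
def gutCont : List String → List String
  | [] => []
  | l :: ls => if l = "" then "\n" :: gutCont ls else l :: gutLoopB ls

lemma gutLoopB_nil : gutLoopB [] = [] := by simp [gutLoopB]

lemma gutLoopB_cons (l : String) (ls : List String) :
    gutLoopB (l :: ls) =
      if l = "" then
        List.replicate (ls.takeWhile (· == "")).length "\n" ++ gutLoopB (ls.dropWhile (· == ""))
      else l :: gutLoopB ls := by
  rw [gutLoopB]

lemma gutCont_eq (ls : List String) :
    List.replicate (ls.takeWhile (· == "")).length "\n" ++ gutLoopB (ls.dropWhile (· == "")) =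
      gutCont ls := by
  induction ls with
  | nil => simp [gutCont, gutLoopB_nil]
  | cons l ls ih =>
    by_cases h : l = ""
    · subst h
      simp only [List.takeWhile_cons, List.dropWhile_cons, gutCont,
        beq_self_eq_true, if_true, List.length_cons, List.replicate_succ, List.cons_append]
      exact congrArg _ ih
    · have hb : (l == "") = false := by simp [h]
      simp only [List.takeWhile_cons, List.dropWhile_cons, hb, if_false, Bool.false_eq_true,
        List.length_nil, List.replicate_zero, List.nil_append]
      rw [gutLoopB_cons, if_neg h]
      simp [gutCont, h]

lemma gutLoopB_cons_blank (ls : List String) : gutLoopB ("" :: ls) = gutCont ls := by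
  rw [gutLoopB_cons]; simp [gutCont_eq]

lemma gutLoopA_eq (xs : List String) : ∀ (acc : List String) (prev : Option String),
    gutLoopA acc prev xs =
      acc ++ (if prev = some "" then gutCont (xs.map PySem.Str.strip)
              else gutLoopB (xs.map PySem.Str.strip)) := by
  induction xs with
  | nil => intro acc prev; cases prev <;> simp [gutLoopA, gutCont, gutLoopB_nil]
  | cons l ls ih =>
    intro acc prev
    show (let line := PySem.Str.strip l;
      if line = "" then
        if prev = some "" then gutLoopA (acc ++ ["\n"]) (some line) ls
        else gutLoopA acc (some line) ls
      else gutLoopA (acc ++ [line]) (some line) ls) = _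
    simp only []
    by_cases hline : PySem.Str.strip l = ""
    · rw [hline]
      by_cases hprev : prev = some ""
      · subst hprev
        rw [if_pos rfl, if_pos rfl, ih, if_pos rfl, List.map_cons, hline]
        simp [gutCont]
      · rw [if_pos rfl, if_neg hprev, ih, if_pos rfl, List.map_cons, hline,
          if_neg hprev, gutLoopB_cons_blank]
    · rw [if_neg hline, ih, List.map_cons]
      have hs : ¬ (some (PySem.Str.strip l) = some ("" : String)) := by simpa using hline
      rw [if_neg hs]
      rw [gutLoopB_cons, if_neg hline]
      cases prev with
      | none => simp
      | some p =>
        by_cases hp : p = ""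
        · subst hp
          rw [if_pos rfl]
          simp [gutCont, hline]
        · rw [if_neg (by simpa using hp)]
          simp

-- ===== VERDICT (by name: the statement is the Claim_ definition above) =====
theorem quality_gutenberg_parser_spec : Claim_equal_quality_gutenberg_parser := by
  intro raw_article _
  unfold Spec_quality_gutenberg_parser quality_gutenberg_parser quality_gutenberg_parser_alt
  rw [gutLoopA_eq]
  simp
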